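-- pv_equiv track=rewrite | github.com/Pack3tL0ss/central-api-cli | centralcli/models.py | _parse_radio_mode_values
-- ===== SOURCE A (Python) =====
-- def _parse_radio_mode_values(
--     access_radios: None | list,
--     monitor_radios: None | list,
--     spectrum_radios: None | list,
-- ) -> tuple:
--     radio_24_mode, radio_5_mode, radio_6_mode = None, None, None
--     modes = ["access", "monitor", "spectrum"]
--     for mode, radios in zip(modes, [access_radios, monitor_radios, spectrum_radios]):
--         if radios is None:
--             continue
--         if radio_24_mode is None:
--             radio_24_mode = None if "2.4" not in radios else mode
--         if radio_5_mode is None: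
--             radio_5_mode = None if "5" not in radios else mode
--         if radio_6_mode is None:
--             radio_6_mode = None if "6" not in radios else mode
--
--     return radio_24_mode, radio_5_mode, radio_6_mode
-- ===== SOURCE B (Python) =====
-- def _parse_radio_mode_values(
--     access_radios,
--     monitor_radios,
--     spectrum_radios,
-- ):
--     pairs = list(zip(["access", "monitor", "spectrum"],
--                      [access_radios, monitor_radios, spectrum_radios]))
--
--     def find(band):
--         for mode, radios in pairs:
--             if radios is not None and band in radios:
--                 return mode
--         return None
--
--     return find("2.4"), find("5"), find("6")
-- ===== Notes on version B (the rewrite author's own statement) =====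
-- stated objective: simpler
-- what changed: Replaces A's single loop that maintains three None-guarded accumulators with three independent first-match searches (one per band) over the same (mode, radios) pairs.
import Mathlib
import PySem

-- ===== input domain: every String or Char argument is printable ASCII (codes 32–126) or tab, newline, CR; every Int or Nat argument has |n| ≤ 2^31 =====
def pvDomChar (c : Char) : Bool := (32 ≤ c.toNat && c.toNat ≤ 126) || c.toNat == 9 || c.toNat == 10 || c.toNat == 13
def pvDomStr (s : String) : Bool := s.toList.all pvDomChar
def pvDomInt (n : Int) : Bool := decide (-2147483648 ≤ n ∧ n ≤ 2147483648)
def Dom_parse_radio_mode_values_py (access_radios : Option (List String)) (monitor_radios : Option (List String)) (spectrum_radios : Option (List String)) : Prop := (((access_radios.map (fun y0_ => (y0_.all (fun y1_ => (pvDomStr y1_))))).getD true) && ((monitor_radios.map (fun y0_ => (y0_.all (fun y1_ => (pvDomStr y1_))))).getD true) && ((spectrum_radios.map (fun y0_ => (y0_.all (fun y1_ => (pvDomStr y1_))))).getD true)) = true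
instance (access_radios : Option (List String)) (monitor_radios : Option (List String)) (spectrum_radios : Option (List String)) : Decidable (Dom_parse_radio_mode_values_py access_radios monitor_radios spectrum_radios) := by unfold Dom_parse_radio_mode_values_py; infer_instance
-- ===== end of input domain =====

-- One honest line: B replaces A's accumulator-carrying loop with three independent
-- first-match searches (one per band) over the same ordered (mode, radios) pairs; objective: simpler.

-- ===== PORT A =====
-- loop body of A: update the three accumulators from one (mode, radios) pair
def pvAStep (st : Option String × Option String × Option String) (p : String × Option (List String)) :
    Option String × Option String × Option String :=
  match p.2 with
  | none => st                      -- 'continue'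
  | some radios =>
    let r24 := if st.1 = none then (if radios.contains "2.4" = false then none else some p.1) else st.1
    let r5  := if st.2.1 = none then (if radios.contains "5" = false then none else some p.1) else st.2.1
    let r6  := if st.2.2 = none then (if radios.contains "6" = false then none else some p.1) else st.2.2
    (r24, r5, r6)

def parse_radio_mode_values_py (access_radios : Option (List String)) (monitor_radios : Option (List String)) (spectrum_radios : Option (List String)) : Option String × Option String × Option String :=
  (List.zip ["access", "monitor", "spectrum"] [access_radios, monitor_radios, spectrum_radios]).foldl
    pvAStep (none, none, none)

-- ===== PORT B =====
-- B's find(band): first mode whose radios is not None and contains band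
def pvFind (band : String) : List (String × Option (List String)) → Option String
  | [] => none
  | (mode, radios) :: rest =>
    match radios with
    | some rs => if rs.contains band then some mode else pvFind band rest
    | none => pvFind band rest

def parse_radio_mode_values_py_alt (access_radios : Option (List String)) (monitor_radios : Option (List String)) (spectrum_radios : Option (List String)) : Option String × Option String × Option String :=
  let pairs := List.zip ["access", "monitor", "spectrum"] [access_radios, monitor_radios, spectrum_radios]
  (pvFind "2.4" pairs, pvFind "5" pairs, pvFind "6" pairs)

-- ===== PRECONDITION & SPEC =====
def Spec_parse_radio_mode_values_py (access_radios : Option (List String)) (monitor_radios : Option (List String)) (spectrum_radios : Option (List String)) (out : Option String × Option String × Option String) : Prop := out = parse_radio_mode_values_py_alt access_radios monitor_radios spectrum_radios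
instance (access_radios : Option (List String)) (monitor_radios : Option (List String)) (spectrum_radios : Option (List String)) (out : Option String × Option String × Option String) : Decidable (Spec_parse_radio_mode_values_py access_radios monitor_radios spectrum_radios out) := by unfold Spec_parse_radio_mode_values_py; infer_instance

-- ===== CLAIM (what is proved, stated in full; the proofs are below) =====
def Claim_equal_parse_radio_mode_values_py : Prop := ∀ (access_radios : Option (List String)) (monitor_radios : Option (List String)) (spectrum_radios : Option (List String)), Dom_parse_radio_mode_values_py access_radios monitor_radios spectrum_radios → Spec_parse_radio_mode_values_py access_radios monitor_radios spectrum_radios (parse_radio_mode_values_py access_radios monitor_radios spectrum_radios)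

-- ===== LEMMAS AND PROOFS =====

-- A's fold over any pair list starting from a partially-filled state equals B's three finds,
-- with a filled slot frozen.
theorem pvFold_eq_find (ps : List (String × Option (List String)))
    (a b c : Option String) :
    ps.foldl pvAStep (a, b, c) =
      ((if a = none then pvFind "2.4" ps else a),
       (if b = none then pvFind "5" ps else b),
       (if c = none then pvFind "6" ps else c)) := by
  induction ps generalizing a b c with
  | nil => cases a <;> cases b <;> cases c <;> simp [pvFind]
  | cons p rest ih =>
    obtain ⟨mode, radios⟩ := p
    cases radios with
    | none =>
      simp only [List.foldl_cons, pvAStep, pvFind]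
      rw [ih]
    | some rs =>
      simp only [List.foldl_cons, pvAStep, pvFind]
      rw [ih]
      cases a <;> cases b <;> cases c <;> simp <;> split_ifs <;> simp_all

-- ===== VERDICT (by name: the statement is the Claim_ definition above) =====
theorem parse_radio_mode_values_py_spec : Claim_equal_parse_radio_mode_values_py := by
  intro a m s _
  unfold Spec_parse_radio_mode_values_py parse_radio_mode_values_py parse_radio_mode_values_py_alt
  rw [pvFold_eq_find]
  simp
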